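-- pv_equiv track=rewrite | github.com/alyliann/Python-Practice | No-Repeating-Characters.py | length_three_substrings
-- ===== SOURCE A (Python) =====
-- def length_three_substrings(string):
--   if len(string) < 3:
--     return 0
--
--   pointer1 = 0
--   pointer2 = 3
--   count = 0
--   condition = False
--
--   while pointer2 <= len(string):
--     temp = ''
--     for i in range(pointer1, pointer2):
--       if temp.count(string[i]) > 0:
--         condition = True
--       temp += string[i]
--
--     if condition == False:
--       count += 1
--
--     pointer1 += 1
--     pointer2 += 1
--
--   return count
-- ===== SOURCE B (Python) =====
-- def length_three_substrings(string):
--   count = 0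
--   for i in range(len(string) - 2):
--     if len(set(string[i:i+3])) == 3:
--       count += 1
--     else:
--       break
--   return count
-- ===== Notes on version B (the rewrite author's own statement) =====
-- stated objective: faster
-- what changed: B replaces A's two-pointer while-loop with a sticky never-reset boolean flag and an inner character-accumulating temp-string scan by a single for-loop over window starts that tests each 3-character window with len(set(...))==3 and breaks immediately at the first repeating window, so the scan stops where A keeps iterating uselessly.
import Mathlib
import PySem

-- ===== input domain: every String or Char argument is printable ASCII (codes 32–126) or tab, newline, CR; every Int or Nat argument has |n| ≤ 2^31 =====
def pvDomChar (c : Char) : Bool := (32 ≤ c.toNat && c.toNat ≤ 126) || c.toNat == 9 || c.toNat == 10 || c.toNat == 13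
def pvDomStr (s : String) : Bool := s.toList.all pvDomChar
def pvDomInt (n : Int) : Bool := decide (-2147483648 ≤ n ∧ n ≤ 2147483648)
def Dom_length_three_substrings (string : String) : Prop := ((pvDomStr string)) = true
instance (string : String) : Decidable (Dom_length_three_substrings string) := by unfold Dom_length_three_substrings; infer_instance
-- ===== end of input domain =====

-- B replaces the sticky-flag full scan by an early-exit loop over 3-char windows (len(set)==3, break on first repeat); measured faster since it stops at the first repeating window while A scans the whole string.

-- ===== PORT A =====
-- the while loop: fuel = len - pointer2 + 1 remaining iterations; p1 is pointer1 (pointer2 = p1 + 3)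
def ltsLoopA (cs : List Char) : Nat → Int → Int → Bool → Int
  | 0, _, count, _ => count
  | fuel + 1, p1, count, cond =>
    -- inner for: temp built char by char; temp.count(string[i]) > 0 sets condition (sticky)
    -- string[i] ported as pyGetD with default ' ': i always in range here, so exact
    let st := (PySem.List.pyRange p1 (p1 + 3) 1).foldl
      (fun (st : List Char × Bool) i =>
        let c := PySem.List.pyGetD cs i ' '
        let cond' := if PySem.List.count st.1 c > 0 then true else st.2
        (st.1 ++ [c], cond')) ([], cond)
    let count' := if st.2 = false then count + 1 else count
    ltsLoopA cs fuel (p1 + 1) count' st.2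

def length_three_substrings (string : String) : Int :=
  let cs := string.toList
  if (cs.length : Int) < 3 then 0
  else ltsLoopA cs (cs.length - 2) 0 0 false

-- ===== PORT B =====
-- for i in range(len(string)-2): count windows with 3 distinct chars, break at first failure
def ltsLoopB (cs : List Char) : List Int → Int → Int
  | [], count => count
  | i :: rest, count =>
    if PySem.Set.len (PySem.Set.ofList (PySem.List.slice cs (some i) (some (i + 3)))) = 3
    then ltsLoopB cs rest (count + 1)
    else count

def length_three_substrings_alt (string : String) : Int :=
  ltsLoopB string.toList (PySem.List.pyRange 0 ((string.toList.length : Int) - 2) 1) 0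

-- ===== PRECONDITION & SPEC =====
def Spec_length_three_substrings (string : String) (out : Int) : Prop := out = length_three_substrings_alt string
instance (string : String) (out : Int) : Decidable (Spec_length_three_substrings string out) := by unfold Spec_length_three_substrings; infer_instance

-- ===== CLAIM (what is proved, stated in full; the proofs are below) =====
def Claim_equal_length_three_substrings : Prop := ∀ (string : String), Dom_length_three_substrings string → Spec_length_three_substrings string (length_three_substrings string)

-- ===== LEMMAS AND PROOFS =====

-- the inner fold keeps the sticky flag true once true
theorem ltsInner_sticky (cs : List Char) (l : List Int) (t : List Char) :
    (l.foldl (fun (st : List Char × Bool) i =>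
        let c := PySem.List.pyGetD cs i ' '
        let cond' := if PySem.List.count st.1 c > 0 then true else st.2
        (st.1 ++ [c], cond')) (t, true)).2 = true := by
  induction l generalizing t with
  | nil => rfl
  | cons i rest ih =>
    simp only [List.foldl_cons]
    split <;> exact ih _

-- once condition is true, A's loop never increments count again
theorem ltsLoopA_true (cs : List Char) (fuel : Nat) :
    ∀ (p1 count : Int), ltsLoopA cs fuel p1 count true = count := by
  induction fuel with
  | zero => intro p1 count; rfl
  | succ fuel ih =>
    intro p1 count
    show ltsLoopA cs fuel _ _ _ = count
    rw [ltsInner_sticky]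
    simp only [if_neg (by decide : ¬ (true = false))]
    exact ih _ _

-- len(set([a,b,c])) == 3 iff the three characters are pairwise distinct
theorem set3_distinct_iff (a b c : Char) :
    (PySem.Set.len (PySem.Set.ofList [a, b, c]) = 3) ↔ (b ≠ a ∧ c ≠ a ∧ c ≠ b) := by
  simp [PySem.Set.ofList, PySem.Set.add, PySem.Set.contains, PySem.Set.len]
  split_ifs <;> simp_all
  tauto

-- main correspondence between the two loops
theorem loops_agree (cs : List Char) (fuel : Nat) :
    ∀ (p1 : Nat) (count : Int), p1 + fuel + 2 ≤ cs.length →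
      ltsLoopA cs fuel (p1 : Int) count false
        = ltsLoopB cs (PySem.List.pyRange (p1 : Int) ((p1 : Int) + (fuel : Int)) 1) count := by
  induction fuel with
  | zero =>
    intro p1 count _
    rw [PySem.List.pyRange_one_eq_nil (by omega)]
    rfl
  | succ fuel ih =>
    intro p1 count h
    -- decompose the window: cs.drop p1 has length ≥ 3
    obtain ⟨a, b, c, rest, hd⟩ : ∃ a b c rest, cs.drop p1 = a :: b :: c :: rest := by
      have hlen : 3 ≤ (cs.drop p1).length := by simp [List.length_drop]; omega
      match hds : cs.drop p1 with
      | [] => rw [hds] at hlen; simp at hlen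
      | [x] => rw [hds] at hlen; simp at hlen
      | [x, y] => rw [hds] at hlen; simp at hlen
      | x :: y :: z :: r => exact ⟨x, y, z, r, rfl⟩
    have hget : ∀ k : Nat, k < 3 → cs.getD (p1 + k) ' ' = (cs.drop p1).getD k ' ' := by
      intro k hk
      simp [List.getD_eq_getElem?_getD, List.getElem?_drop]
    have ha : cs.getD p1 ' ' = a := by have := hget 0 (by omega); simpa [hd] using this
    have hb : cs.getD (p1 + 1) ' ' = b := by have := hget 1 (by omega); simpa [hd] using this
    have hc : cs.getD (p1 + 2) ' ' = c := by have := hget 2 (by omega); simpa [hd] using this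
    -- unfold A's window: pyRange p1 (p1+3) = [p1, p1+1, p1+2]
    have hr3 : PySem.List.pyRange (p1 : Int) ((p1 : Int) + 3) 1
        = [(p1 : Int), (p1 : Int) + 1, (p1 : Int) + 1 + 1] := by
      rw [PySem.List.pyRange_one_cons (by omega), PySem.List.pyRange_one_cons (by omega),
          PySem.List.pyRange_one_cons (by omega), PySem.List.pyRange_one_eq_nil (by omega)]
    -- unfold B's window: slice cs p1 (p1+3) = [a, b, c]
    have hslice : PySem.List.slice cs (some (p1 : Int)) (some ((p1 : Int) + 3)) = [a, b, c] := by
      have : ((p1 : Int) + 3) = ((p1 : Int) + ((3 : Nat) : Int)) := by push_cast; ring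
      rw [this, PySem.List.slice_natCast_add, hd]
      rfl
    -- unfold B's range: p1 :: rest of range
    have hrB : PySem.List.pyRange (p1 : Int) ((p1 : Int) + ((fuel : Int) + 1)) 1
        = (p1 : Int) :: PySem.List.pyRange ((p1 : Int) + 1) ((p1 : Int) + ((fuel : Int) + 1)) 1 :=
      PySem.List.pyRange_one_cons (by omega)
    show ltsLoopA cs (fuel + 1) (p1 : Int) count false = _
    rw [ltsLoopA]
    rw [hr3]
    simp only [List.foldl_cons, List.foldl_nil, PySem.List.pyGetD_natCast, PySem.List.count]
    have hb' : PySem.List.pyGetD cs ((p1 : Int) + 1) ' ' = b := by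
      have : ((p1 : Int) + 1) = (((p1 + 1 : Nat)) : Int) := by push_cast; ring
      rw [this, PySem.List.pyGetD_natCast]; exact hb
    have hc' : PySem.List.pyGetD cs ((p1 : Int) + 1 + 1) ' ' = c := by
      have : ((p1 : Int) + 1 + 1) = (((p1 + 2 : Nat)) : Int) := by push_cast; ring
      rw [this, PySem.List.pyGetD_natCast]; exact hc
    rw [ha, hb', hc']
    have hcast : (p1 : Int) + ((fuel : Nat) + 1 : Nat) = (p1 : Int) + ((fuel : Int) + 1) := by
      push_cast; ring
    rw [hcast, hrB]
    rw [ltsLoopB, hslice]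
    simp only [set3_distinct_iff]
    have hih : ltsLoopA cs fuel ((p1 : Int) + 1) (count + 1) false
        = ltsLoopB cs (PySem.List.pyRange ((p1 : Int) + 1) ((p1 : Int) + ((fuel : Int) + 1)) 1) (count + 1) := by
      have := ih (p1 + 1) (count + 1) (by omega)
      push_cast at this
      calc ltsLoopA cs fuel ((p1 : Int) + 1) (count + 1) false
          = ltsLoopB cs (PySem.List.pyRange ((p1 : Int) + 1) ((p1 : Int) + 1 + (fuel : Int)) 1) (count + 1) := this
        _ = _ := by ring_nf
    by_cases hab : b = a <;> by_cases hac : c = a <;> by_cases hbc : c = b <;>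
      simp_all [ltsLoopA_true]
-- ===== VERDICT (by name: the statement is the Claim_ definition above) =====
theorem length_three_substrings_spec : Claim_equal_length_three_substrings := by
  intro s _
  unfold Spec_length_three_substrings length_three_substrings length_three_substrings_alt
  set cs := s.toList with hcs
  by_cases h3 : (cs.length : Int) < 3
  · rw [if_pos h3, PySem.List.pyRange_one_eq_nil (by omega)]
    rfl
  · rw [if_neg h3]
    have h : 0 + (cs.length - 2) + 2 ≤ cs.length := by omega
    have := loops_agree cs (cs.length - 2) 0 0 h
    simp only [Nat.cast_zero] at this
    rw [this]
    congr 1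
    congr 1
    push_cast [Nat.cast_sub (by omega : 2 ≤ cs.length)]
    ring
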